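-- pv_equiv track=rewrite | github.com/AlbertRocafort/Jutge | P26492 - Balanced numbers/P26492_0.py | es_equilibrat
-- ===== SOURCE A (Python) =====
-- def es_equilibrat(n):
--
-- 	suma_parells = 0
-- 	suma_senars = 0
--
-- 	while n > 0:
-- 		suma_senars += n%10
-- 		n //= 10
-- 		suma_parells += n%10
-- 		n //= 10
--
-- 	if suma_parells == suma_senars: return True
-- 	return False
-- ===== SOURCE B (Python) =====
-- def es_equilibrat(n):
--     digits = []
--     while n > 0:
--         digits.append(n % 10)
--         n //= 10
--     return sum(digits[::2]) == sum(digits[1::2])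
-- ===== Notes on version B (the rewrite author's own statement) =====
-- stated objective: alternative
-- what changed: B stages the work: it first materializes the list of digits, then compares the sums of the two step-2 slices digits[::2] and digits[1::2], instead of A's fused single loop that consumes two digits per iteration into two running accumulators.
import Mathlib
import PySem

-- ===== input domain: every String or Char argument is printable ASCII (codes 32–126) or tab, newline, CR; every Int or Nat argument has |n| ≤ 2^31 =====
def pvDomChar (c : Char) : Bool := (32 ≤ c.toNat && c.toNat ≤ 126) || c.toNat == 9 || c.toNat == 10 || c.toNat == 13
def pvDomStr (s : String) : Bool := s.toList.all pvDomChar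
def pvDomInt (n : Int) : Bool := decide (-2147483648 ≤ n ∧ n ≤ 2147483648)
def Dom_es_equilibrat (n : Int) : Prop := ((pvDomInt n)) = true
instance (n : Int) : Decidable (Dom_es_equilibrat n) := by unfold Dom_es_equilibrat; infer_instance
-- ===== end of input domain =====

-- B first materializes the list of digits, then compares the sums of the two step-2
-- slices digits[::2] and digits[1::2], instead of A's fused two-accumulator loop
-- consuming two digits per iteration; objective: alternative (staged decomposition).

-- ===== PORT A =====
-- termination helpers for the while loops
theorem pvFloordiv_lt (n : Int) (h : 0 < n) : (PySem.Int.floordiv n 10).toNat < n.toNat := by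
  rw [PySem.Int.floordiv_eq_ediv_of_pos (by omega)]
  omega

theorem pvFloordiv_nonneg (n : Int) (h : 0 ≤ n) : 0 ≤ PySem.Int.floordiv n 10 := by
  rw [PySem.Int.floordiv_eq_ediv_of_pos (by omega)]
  omega

theorem pvFloordiv_zero : PySem.Int.floordiv 0 10 = 0 := by
  rw [PySem.Int.floordiv_eq_ediv_of_pos (by omega)]
  simp

theorem pvFloordiv2_lt (n : Int) (h : 0 < n) :
    (PySem.Int.floordiv (PySem.Int.floordiv n 10) 10).toNat < n.toNat := by
  have h1 := pvFloordiv_lt n h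
  rcases (lt_or_eq_of_le (pvFloordiv_nonneg n (by omega))) with h2 | h2
  · exact lt_trans (pvFloordiv_lt _ h2) h1
  · rw [← h2, pvFloordiv_zero]; omega

-- the while loop of A, state (n, suma_parells, suma_senars)
def esLoopA (n sp ss : Int) : Int × Int :=
  if n > 0 then
    let ss' := ss + PySem.Int.mod n 10
    let n1 := PySem.Int.floordiv n 10
    let sp' := sp + PySem.Int.mod n1 10
    let n2 := PySem.Int.floordiv n1 10
    esLoopA n2 sp' ss'
  else (sp, ss)
termination_by n.toNat
decreasing_by exact pvFloordiv2_lt n (by omega)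

def es_equilibrat (n : Int) : Bool :=
  let r := esLoopA n 0 0
  if r.1 = r.2 then true else false

-- ===== PORT B =====
-- stage 1 of B: the while loop collecting the digits (least significant first)
def digitsLoopB (n : Int) (acc : List Int) : List Int :=
  if n > 0 then digitsLoopB (PySem.Int.floordiv n 10) (acc ++ [PySem.Int.mod n 10])
  else acc
termination_by n.toNat
decreasing_by exact pvFloordiv_lt n (by omega)

-- stage 2 of B: sum(digits[::2]) == sum(digits[1::2])
def es_equilibrat_alt (n : Int) : Bool :=
  let digits := digitsLoopB n []
  ((PySem.List.slice? digits none none 2).getD []).sum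
    == ((PySem.List.slice? digits (some 1) none 2).getD []).sum

-- ===== PRECONDITION & SPEC =====
def Spec_es_equilibrat (n : Int) (out : Bool) : Prop := out = es_equilibrat_alt n
instance (n : Int) (out : Bool) : Decidable (Spec_es_equilibrat n out) := by unfold Spec_es_equilibrat; infer_instance

-- ===== CLAIM (what is proved, stated in full; the proofs are below) =====
def Claim_equal_es_equilibrat : Prop := ∀ (n : Int), Dom_es_equilibrat n → Spec_es_equilibrat n (es_equilibrat n)

-- ===== LEMMAS AND PROOFS =====

-- every other element of a list, starting with the head: what digits[::2] selects
def everyOther {α : Type} (xs : List α) : List α :=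
  match xs with
  | [] => []
  | x :: rest => x :: everyOther rest.tail
termination_by xs.length
decreasing_by simp

theorem everyOther_nil {α : Type} : everyOther ([] : List α) = [] := by
  rw [everyOther.eq_def]

theorem everyOther_cons {α : Type} (x : α) (rest : List α) :
    everyOther (x :: rest) = x :: everyOther rest.tail := by
  rw [everyOther.eq_def]

-- pure form of B's digit list
def digitsOf (n : Int) : List Int :=
  if n > 0 then PySem.Int.mod n 10 :: digitsOf (PySem.Int.floordiv n 10) else []
termination_by n.toNat
decreasing_by exact pvFloordiv_lt n (by omega)

theorem digitsLoopB_eq (n : Int) (acc : List Int) :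
    digitsLoopB n acc = acc ++ digitsOf n := by
  induction n, acc using digitsLoopB.induct with
  | case1 n acc h ih =>
    rw [digitsLoopB, if_pos h, ih]
    conv_rhs => rw [digitsOf]
    rw [if_pos h]
    simp
  | case2 n acc h =>
    rw [digitsLoopB, if_neg h, digitsOf, if_neg h]
    simp
  
-- the filterMap-over-range form that slice? produces, for indices 2k
theorem filterMap_two_eq_everyOther {α : Type} (xs : List α) (c : Nat)
    (hc : xs.length ≤ 2 * c) :
    List.filterMap (fun k => xs[2 * k]?) (List.range c) = everyOther xs := by
  induction c generalizing xs with
  | zero =>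
    have hx : xs = [] := by
      cases xs with
      | nil => rfl
      | cons a t => simp at hc
    subst hx
    simp [everyOther_nil]
  | succ c ih =>
    cases xs with
    | nil =>
      rw [everyOther_nil]
      apply List.filterMap_eq_nil_iff.mpr
      intro k _; simp
    | cons x rest =>
      rw [List.range_succ_eq_map, List.filterMap_cons]
      simp only [Nat.mul_zero, List.getElem?_cons_zero, List.filterMap_map]
      rw [everyOther_cons]
      congr 1
      cases rest with
      | nil =>
        rw [List.tail_nil, everyOther_nil]
        apply List.filterMap_eq_nil_iff.mpr
        intro k _
        simp only [Function.comp_apply]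
        have h2 : 2 * (k + 1) = k + (k + 2) := by omega
        simp [h2]
      | cons y r =>
        have hgoal : ∀ k : Nat, ((fun k => (x :: y :: r)[2 * k]?) ∘ Nat.succ) k
            = (fun k => r[2 * k]?) k := by
          intro k
          simp only [Function.comp_apply]
          have h2 : 2 * Nat.succ k = 2 * k + 1 + 1 := by omega
          rw [h2]
          simp
        rw [List.filterMap_congr (fun k _ => hgoal k)]
        rw [List.tail_cons]
        exact ih r (by simp at hc ⊢; omega)

-- digits[::2] is everyOther digits
theorem slice?_step_two_zero {α : Type} (xs : List α) :
    PySem.List.slice? xs none none 2 = some (everyOther xs) := by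
  rw [PySem.List.slice?]
  simp only [PySem.List.sliceIndices]
  norm_num
  rw [show (fun (k : Nat) => xs[(2 * (k : Int)).toNat]?) = fun k => xs[2 * k]? from
    funext fun k => by rw [show ((2 : Int) * (k : Int)).toNat = 2 * k from by omega]]
  by_cases h : 0 < xs.length
  · rw [if_pos h]
    apply filterMap_two_eq_everyOther
    omega
  · rw [if_neg h]
    have hx : xs = [] := by cases xs <;> simp_all
    subst hx
    simp [everyOther_nil]

-- digits[1::2] is everyOther of the tail
theorem slice?_step_two_one {α : Type} (xs : List α) :
    PySem.List.slice? xs (some 1) none 2 = some (everyOther xs.tail) := by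
  rw [PySem.List.slice?]
  simp only [PySem.List.sliceIndices]
  norm_num
  by_cases hx : xs = []
  · subst hx
    simp [everyOther_nil]
  · have hlen : 0 < xs.length := List.length_pos_of_ne_nil hx
    rw [show min (1 : Int) (xs.length : Int) = 1 by omega]
    by_cases h1 : 1 < xs.length
    · rw [if_pos h1]
      have hidx : ∀ k : Nat, xs[(1 + 2 * (k : Int)).toNat]? = xs.tail[2 * k]? := by
        intro k
        rw [show (1 + 2 * (k : Int)).toNat = 2 * k + 1 from by omega]
        cases xs with
        | nil => exact absurd rfl hx
        | cons a t => simp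
      rw [List.filterMap_congr (fun k _ => hidx k)]
      apply filterMap_two_eq_everyOther
      have ht : xs.tail.length = xs.length - 1 := by simp
      omega
    · rw [if_neg h1]
      cases xs with
      | nil => exact absurd rfl hx
      | cons a t =>
        have ht : t = [] := by
          have : t.length = 0 := by simp at h1 hlen ⊢; omega
          exact List.eq_nil_of_length_eq_zero this
        subst ht
        simp [everyOther_nil]

-- A's loop computes (sp + Σ digits[1::2], ss + Σ digits[::2])
theorem esLoopA_char (n sp ss : Int) :
    esLoopA n sp ss
      = (sp + (everyOther (digitsOf n).tail).sum, ss + (everyOther (digitsOf n)).sum) := by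
  induction n, sp, ss using esLoopA.induct with
  | case1 n sp ss h ss' n1 sp' n2 ih =>
    rw [esLoopA, if_pos h]
    simp only at ih ⊢
    rw [ih]
    by_cases h1 : PySem.Int.floordiv n 10 > 0
    · have hdig : digitsOf n
          = PySem.Int.mod n 10 :: PySem.Int.mod (PySem.Int.floordiv n 10) 10
            :: digitsOf (PySem.Int.floordiv (PySem.Int.floordiv n 10) 10) := by
        rw [digitsOf, if_pos h]
        congr 1
        rw [digitsOf, if_pos h1]
      rw [hdig]
      simp only [everyOther_cons, List.tail_cons, List.sum_cons, n1, n2, ss', sp',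
        Prod.mk.injEq]
      constructor <;> ring
    · have h2 : PySem.Int.floordiv n 10 = 0 := by
        have := pvFloordiv_nonneg n (by omega); omega
      have hdig : digitsOf n = [PySem.Int.mod n 10] := by
        rw [digitsOf, if_pos h]
        congr 1
        rw [digitsOf, if_neg h1]
      rw [hdig]
      have hn2 : n2 = 0 := by simp only [n2, n1, h2]; exact pvFloordiv_zero
      have hd0 : digitsOf n2 = [] := by rw [hn2, digitsOf]; norm_num
      rw [hd0] at ih ⊢
      simp only [everyOther_cons, everyOther_nil, List.tail_cons, List.tail_nil,
        List.sum_cons, List.sum_nil, n1, ss', sp', h2, Prod.mk.injEq]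
      have hm0 : PySem.Int.mod 0 10 = 0 := by simp [PySem.Int.mod]
      rw [hm0]
      constructor <;> ring
  | case2 n sp ss h =>
    rw [esLoopA, if_neg h, digitsOf, if_neg h]
    simp [everyOther_nil]

-- ===== VERDICT (by name: the statement is the Claim_ definition above) =====
theorem es_equilibrat_spec : Claim_equal_es_equilibrat := by
  intro n _
  unfold Spec_es_equilibrat es_equilibrat es_equilibrat_alt
  rw [digitsLoopB_eq n []]
  simp only [List.nil_append]
  rw [slice?_step_two_zero, slice?_step_two_one]
  rw [esLoopA_char n 0 0]
  simp only [Option.getD_some, zero_add]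
  by_cases h : (everyOther (digitsOf n).tail).sum = (everyOther (digitsOf n)).sum
  · simp [h]
  · simp [h, Ne.symm h]
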